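-- pv_equiv track=rewrite | github.com/hienpham15/Codeforces_competitions | Codeforces_round727/A.py | func
-- ===== SOURCE A (Python) =====
-- def func(n, x, t):
--
--     start_time = []
--     finish_time = []
--
--     for i in range(n):
--         start_time.append(x*i)
--         finish_time.append(x*i + t)
--     dis = 0
--     for i in range(len(start_time)):
--          arr = [x for x in start_time[(i+1):] if x <= finish_time[i]]
--          dis += len(arr)
--
--     return dis
-- ===== SOURCE B (Python) =====
-- def func(n, x, t):
--     # O(n): for each bus i, count later buses j (gap d = j - i in 1..n-1-i)
--     # with x*d <= t, using a closed-form count instead of scanning them.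
--     total = 0
--     for i in range(n):
--         m = n - 1 - i  # number of later buses
--         if x > 0:
--             k = t // x  # largest gap d with x*d <= t
--             total += min(k, m) if k > 0 else 0
--         elif x == 0:
--             total += m if t >= 0 else 0
--         else:
--             lo = max(-((-t) // x), 1)  # smallest valid gap
--             total += m - lo + 1 if lo <= m else 0
--     return total
-- ===== Notes on version B (the rewrite author's own statement) =====
-- stated objective: faster
-- what changed: Replaced A's O(n^2) pass (build start/finish lists, then for each bus scan all later start times) with a single O(n) loop that counts the qualifying later buses for each i in closed form via floor/ceil division by x (handling x>0, x=0, x<0).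
import Mathlib
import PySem

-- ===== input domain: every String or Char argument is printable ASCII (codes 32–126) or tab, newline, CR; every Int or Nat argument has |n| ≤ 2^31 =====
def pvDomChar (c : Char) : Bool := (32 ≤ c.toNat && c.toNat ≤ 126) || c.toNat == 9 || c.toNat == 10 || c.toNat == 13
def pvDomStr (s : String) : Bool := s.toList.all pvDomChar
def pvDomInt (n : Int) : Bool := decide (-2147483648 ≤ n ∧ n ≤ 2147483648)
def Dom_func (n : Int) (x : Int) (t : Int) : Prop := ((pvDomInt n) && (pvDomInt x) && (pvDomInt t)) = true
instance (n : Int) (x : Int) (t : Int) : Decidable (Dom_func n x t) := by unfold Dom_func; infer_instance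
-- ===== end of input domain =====

-- B replaces A's quadratic scan of later start times by a single loop that counts,
-- for each bus i, the qualifying gaps in closed form (floor/ceil division by x).

-- ===== PORT A =====
def func (n : Int) (x : Int) (t : Int) : Int :=
  -- for i in range(n): start_time.append(x*i); finish_time.append(x*i + t)
  let st := (PySem.List.pyRange 0 n).foldl
      (fun (p : List Int × List Int) i => (p.1 ++ [x * i], p.2 ++ [x * i + t])) ([], [])
  let start_time := st.1
  let finish_time := st.2
  -- for i in range(len(start_time)): dis += len([v for v in start_time[i+1:] if v <= finish_time[i]])
  (PySem.List.pyRange 0 (start_time.length : Int)).foldl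
    (fun dis i =>
      let arr := (PySem.List.slice start_time (some (i + 1)) none).filter
          (fun v => decide (v ≤ PySem.List.pyGetD finish_time i 0))
      dis + (arr.length : Int)) 0

-- ===== PORT B =====
def func_alt (n : Int) (x : Int) (t : Int) : Int :=
  (PySem.List.pyRange 0 n).foldl
    (fun total i =>
      let m := n - 1 - i
      if x > 0 then
        let k := PySem.Int.floordiv t x
        total + (if k > 0 then min k m else 0)
      else if x = 0 then
        total + (if t ≥ 0 then m else 0)
      else
        let lo := max (-(PySem.Int.floordiv (-t) x)) 1
        total + (if lo ≤ m then m - lo + 1 else 0)) 0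

-- ===== PRECONDITION & SPEC =====
def Spec_func (n : Int) (x : Int) (t : Int) (out : Int) : Prop := out = func_alt n x t
instance (n : Int) (x : Int) (t : Int) (out : Int) : Decidable (Spec_func n x t out) := by unfold Spec_func; infer_instance

-- ===== CLAIM (what is proved, stated in full; the proofs are below) =====
def Claim_equal_func : Prop := ∀ (n : Int) (x : Int) (t : Int), Dom_func n x t → Spec_func n x t (func n x t)

-- ===== LEMMAS AND PROOFS =====

-- count of k in [0, m) with k < K
lemma pvCountLt (K : Int) (m : Nat) :
    (((List.range m).countP (fun k : Nat => decide ((k : Int) < K))) : Int) = max 0 (min K (m : Int)) := by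
  induction m with
  | zero =>
    simp only [List.range_zero, List.countP_nil, Nat.cast_zero]
    omega
  | succ m ih =>
    rw [List.range_succ, List.countP_append, List.countP_cons, List.countP_nil]
    push_cast
    rw [ih]
    split_ifs with h <;> simp only [decide_eq_true_eq] at h <;> omega

-- count of k in [0, m) with L ≤ k
lemma pvCountGe (L : Int) (m : Nat) :
    (((List.range m).countP (fun k : Nat => decide (L ≤ (k : Int)))) : Int)
      = (m : Int) - max 0 (min L (m : Int)) := by
  induction m with
  | zero =>
    simp only [List.range_zero, List.countP_nil, Nat.cast_zero]
    omega
  | succ m ih =>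
    rw [List.range_succ, List.countP_append, List.countP_cons, List.countP_nil]
    push_cast
    rw [ih]
    split_ifs with h <;> simp only [decide_eq_true_eq] at h <;> omega

-- the gap count in closed form (B's per-bus branch), for every sign of x
lemma pvGapCount (x t : Int) (m : Nat) :
    (((List.range m).countP (fun k : Nat => decide (x * ((k : Int) + 1) ≤ t))) : Int) =
      (if x > 0 then
        (if PySem.Int.floordiv t x > 0 then min (PySem.Int.floordiv t x) (m : Int) else 0)
      else if x = 0 then (if t ≥ 0 then (m : Int) else 0)
      else
        (if max (-(PySem.Int.floordiv (-t) x)) 1 ≤ (m : Int) then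
          (m : Int) - max (-(PySem.Int.floordiv (-t) x)) 1 + 1 else 0)) := by
  rcases lt_trichotomy x 0 with hx | hx | hx
  · -- x < 0 : x*(k+1) ≤ t  ↔  -(floordiv (-t) x) - 1 ≤ k
    have hfd : PySem.Int.floordiv (-t) x = PySem.Int.floordiv t (-x) := by
      simpa using PySem.Int.floordiv_neg_neg t (-x)
    have hcong : ((List.range m).countP (fun k : Nat => decide (x * ((k : Int) + 1) ≤ t)))
        = ((List.range m).countP (fun k : Nat => decide (-(PySem.Int.floordiv (-t) x) - 1 ≤ (k : Int)))) := by
      apply List.countP_congr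
      intro k _
      simp only [decide_eq_true_eq]
      rw [hfd]
      have h1 : (-((k : Int) + 1) ≤ PySem.Int.floordiv t (-x)) ↔ (-((k : Int) + 1)) * (-x) ≤ t :=
        PySem.Int.le_floordiv_iff_mul_le (by omega)
      have h2 : (-((k : Int) + 1)) * (-x) = x * ((k : Int) + 1) := by ring
      rw [h2] at h1
      omega
    rw [hcong, pvCountGe]
    have hx' : ¬ x > 0 := by omega
    have hx0 : ¬ x = 0 := by omega
    simp only [hx', hx0, if_false]
    split_ifs with h <;> omega
  · -- x = 0 : the condition is 0 ≤ t, independent of k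
    subst hx
    simp only [zero_mul]
    by_cases ht : (0 : Int) ≤ t
    · simp [ht]
    · simp [ht]
  · -- x > 0 : x*(k+1) ≤ t  ↔  k < floordiv t x
    have hcong : ((List.range m).countP (fun k : Nat => decide (x * ((k : Int) + 1) ≤ t)))
        = ((List.range m).countP (fun k : Nat => decide ((k : Int) < PySem.Int.floordiv t x))) := by
      apply List.countP_congr
      intro k _
      simp only [decide_eq_true_eq]
      have h1 : (((k : Int) + 1) ≤ PySem.Int.floordiv t x) ↔ ((k : Int) + 1) * x ≤ t :=
        PySem.Int.le_floordiv_iff_mul_le hx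
      have h2 : ((k : Int) + 1) * x = x * ((k : Int) + 1) := by ring
      rw [h2] at h1
      omega
    rw [hcong, pvCountLt]
    simp only [hx, if_true]
    split_ifs with h <;> omega

-- A's per-bus filtered-slice length equals B's closed-form branch
lemma pvTermEq (n x t i : Int) (hi0 : 0 ≤ i) (hin : i < n) :
    (((((PySem.List.pyRange 0 n).map (fun j => x * j)).drop (i + 1).toNat).filter
        (fun v => decide (v ≤ x * i + t))).length : Int) =
      (if x > 0 then
        (if PySem.Int.floordiv t x > 0 then min (PySem.Int.floordiv t x) (n - 1 - i) else 0)
      else if x = 0 then (if t ≥ 0 then (n - 1 - i) else 0)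
      else
        (if max (-(PySem.Int.floordiv (-t) x)) 1 ≤ (n - 1 - i) then
          (n - 1 - i) - max (-(PySem.Int.floordiv (-t) x)) 1 + 1 else 0)) := by
  rw [show PySem.List.pyRange 0 n = PySem.List.pyRange 0 (i + 1) ++ PySem.List.pyRange (i + 1) n from
      PySem.List.pyRange_one_append 0 (i + 1) n (by omega) (by omega)]
  rw [List.map_append]
  rw [show (i + 1).toNat = ((PySem.List.pyRange 0 (i + 1)).map (fun j => x * j)).length by
      simp [PySem.List.length_pyRange_one]]
  rw [List.drop_left]
  rw [← List.countP_eq_length_filter, List.countP_map]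
  rw [PySem.List.pyRange_one (i + 1) n, List.countP_map]
  simp only [Function.comp_def]
  have hm : ((n - (i + 1)).toNat : Int) = n - 1 - i := by omega
  have hcong : ((List.range (n - (i + 1)).toNat).countP
        (fun k : Nat => decide (x * (i + 1 + (k : Int)) ≤ x * i + t)))
      = ((List.range (n - (i + 1)).toNat).countP (fun k : Nat => decide (x * ((k : Int) + 1) ≤ t))) := by
    apply List.countP_congr
    intro k _
    simp only [decide_eq_true_eq]
    have h2 : x * (i + 1 + (k : Int)) = x * i + x * ((k : Int) + 1) := by ring
    constructor
    · intro h; rw [h2] at h; linarith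
    · intro h; rw [h2]; linarith
  rw [hcong, pvGapCount, hm]

-- ===== VERDICT (by name: the statement is the Claim_ definition above) =====
theorem func_spec : Claim_equal_func := by
  intro n x t _
  unfold Spec_func func func_alt
  rw [PySem.List.foldl_prod_mk (fun a e => a ++ [x * e]) (fun b e => b ++ [x * e + t])
      (PySem.List.pyRange 0 n) [] []]
  simp only [PySem.List.foldl_append_singleton_eq_map, List.nil_append, List.length_map,
    PySem.List.length_pyRange_one, sub_zero]
  by_cases hn : 0 ≤ n
  · rw [Int.toNat_of_nonneg hn]
    apply PySem.List.foldl_congr_mem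
    intro acc i hi
    rw [PySem.List.mem_pyRange_one] at hi
    obtain ⟨hi0, hin⟩ := hi
    simp only [PySem.List.slice_from _ (by omega : (0 : Int) ≤ i + 1),
      PySem.List.pyGetD_map_pyRange_of_nonneg (fun j => x * j + t) n i 0 hi0 hin,
      pvTermEq n x t i hi0 hin]
    split_ifs <;> ring
  · rw [show ((n.toNat : Nat) : Int) = 0 by omega]
    rw [PySem.List.pyRange_one_eq_nil (le_refl (0 : Int)),
        PySem.List.pyRange_one_eq_nil (by omega : n ≤ 0)]
    rfl
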